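-- pv_equiv track=rewrite | github.com/bdschi1/fin-reasoning-eval | evaluation/contamination.py | _check_verbatim
-- ===== SOURCE A (Python) =====
-- from typing import List, Optional, Tuple
--
-- VERBATIM_THRESHOLD_CHARS: int = 50
--
-- def _check_verbatim(
--     problem_text: str, model_response: str
-- ) -> Tuple[bool, str]:
--     """Slide a window across problem_text; return (flagged, fragment).
--
--     Checks every substring of length VERBATIM_THRESHOLD_CHARS from
--     problem_text against model_response.  Returns on first match.
--     Case-sensitive to avoid false positives from common short phrases.
--
--     Args:
--         problem_text: Source problem text.
--         model_response: Model's response string.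
--
--     Returns:
--         Tuple of (is_flagged, matched_fragment).
--     """
--     threshold = VERBATIM_THRESHOLD_CHARS
--     if len(problem_text) < threshold:
--         return False, ""
--
--     # Use a step of 1 for thorough coverage; bail out on first hit.
--     for start in range(0, len(problem_text) - threshold + 1):
--         fragment = problem_text[start : start + threshold]
--         if fragment in model_response:
--             return True, fragment
--
--     return False, ""
-- ===== SOURCE B (Python) =====
-- from typing import Tuple
--
-- VERBATIM_THRESHOLD_CHARS: int = 50
--
-- def _check_verbatim(problem_text: str, model_response: str) -> Tuple[bool, str]:
--     """Role-reversed scan: for each length-50 window of the RESPONSE, find its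
--     first occurrence in problem_text; the minimum such index is exactly the
--     first problem start whose window appears in the response."""
--     threshold = VERBATIM_THRESHOLD_CHARS
--     if len(problem_text) < threshold:
--         return False, ""
--     hits = [
--         pos
--         for i in range(len(model_response) - threshold + 1)
--         if (pos := problem_text.find(model_response[i : i + threshold])) != -1
--     ]
--     if not hits:
--         return False, ""
--     best = min(hits)
--     return True, problem_text[best : best + threshold]
-- ===== Notes on version B (the rewrite author's own statement) =====
-- stated objective: alternative
-- what changed: B reverses the roles: instead of sliding a window over the problem and testing 'fragment in response' with early return, it enumerates the response's length-50 windows, takes each window's first occurrence index in the problem via str.find, and returns the minimum such index (the minimum equals A's first matching start).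
import Mathlib
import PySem

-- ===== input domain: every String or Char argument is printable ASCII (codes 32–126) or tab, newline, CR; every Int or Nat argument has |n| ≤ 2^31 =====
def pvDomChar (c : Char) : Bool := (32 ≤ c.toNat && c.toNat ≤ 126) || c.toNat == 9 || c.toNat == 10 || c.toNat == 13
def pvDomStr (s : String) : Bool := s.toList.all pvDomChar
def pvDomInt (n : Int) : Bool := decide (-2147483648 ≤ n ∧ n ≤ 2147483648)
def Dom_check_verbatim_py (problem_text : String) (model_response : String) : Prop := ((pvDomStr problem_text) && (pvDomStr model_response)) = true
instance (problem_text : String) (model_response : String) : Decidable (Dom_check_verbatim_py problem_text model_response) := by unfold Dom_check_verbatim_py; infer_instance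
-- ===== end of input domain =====

-- B reverses the roles: it enumerates the RESPONSE's length-50 windows, takes each window's
-- first occurrence index in the problem via str.find, and returns the minimum such index
-- (objective: alternative algorithm; the minimum equals A's first matching start).

-- ===== PORT A =====
-- A's 'for start in range(...)' loop over problem starts, early return on first hit
def pvALoop (p r : String) : List Int → Bool × String
  | [] => (false, "")
  | s :: rest =>
    let fragment := PySem.Str.slice p (some s) (some (s + 50))
    if PySem.Str.isIn fragment r then (true, fragment) else pvALoop p r rest

def check_verbatim_py (problem_text : String) (model_response : String) : Bool × String :=
  if PySem.Str.len problem_text < 50 then (false, "")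
  else pvALoop problem_text model_response
    (PySem.List.pyRange 0 (PySem.Str.len problem_text - 50 + 1) 1)

-- ===== PORT B =====
-- Source B's list comprehension: first-occurrence index in the problem of each response window, -1 dropped
def pvHits (p r : String) : List Int :=
  ((PySem.List.pyRange 0 (PySem.Str.len r - 50 + 1) 1).map
    (fun i => PySem.Str.find p (PySem.Str.slice r (some i) (some (i + 50))))).filter
      (fun pos => pos ≠ -1)

def check_verbatim_py_alt (problem_text : String) (model_response : String) : Bool × String :=
  if PySem.Str.len problem_text < 50 then (false, "")
  else
    match PySem.List.min? (pvHits problem_text model_response) (fun x => x) with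
    | none => (false, "")
    | some best => (true, PySem.Str.slice problem_text (some best) (some (best + 50)))

-- ===== PRECONDITION & SPEC =====
def Spec_check_verbatim_py (problem_text : String) (model_response : String) (out : Bool × String) : Prop := out = check_verbatim_py_alt problem_text model_response
instance (problem_text : String) (model_response : String) (out : Bool × String) : Decidable (Spec_check_verbatim_py problem_text model_response out) := by unfold Spec_check_verbatim_py; infer_instance

-- ===== CLAIM (what is proved, stated in full; the proofs are below) =====
def Claim_equal_check_verbatim_py : Prop := ∀ (problem_text : String) (model_response : String), Dom_check_verbatim_py problem_text model_response → Spec_check_verbatim_py problem_text model_response (check_verbatim_py problem_text model_response)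

-- ===== LEMMAS AND PROOFS =====
theorem pv_slice_toList (r : String) (j : Nat) :
    (PySem.Str.slice r (some (j : Int)) (some ((j : Int) + 50))).toList
      = (r.toList.drop j).take 50 := by
  rw [PySem.Str.toList_slice, PySem.Chars.slice_eq_listSlice]
  have : ((j : Int) + 50) = ((j : Int) + ((50 : Nat) : Int)) := by norm_num
  rw [this, PySem.List.slice_natCast_add]

theorem pv_foldl_min_self (s : Int) (t : List Int) (h : ∀ y ∈ t, s ≤ y) :
    t.foldl min s = s := by
  induction t with
  | nil => rfl
  | cons x xs ih =>
    simp only [List.foldl_cons]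
    rw [min_eq_left (h x (by simp))]
    exact ih (fun y hy => h y (by simp [hy]))

theorem pv_pyRange_pairwise (a b : Int) :
    (PySem.List.pyRange a b 1).Pairwise (· ≤ ·) := by
  by_cases hab : a < b
  · have hterm : (b - a).toNat > 0 := by omega
    induction h : (b - a).toNat generalizing a with
    | zero => omega
    | succ k ih =>
      rw [PySem.List.pyRange_one_cons hab]
      refine List.pairwise_cons.mpr ⟨?_, ?_⟩
      · intro y hy
        have := PySem.List.mem_pyRange_one.mp hy
        omega
      · by_cases hab' : a + 1 < b
        · exact ih (a + 1) hab' (by omega) (by omega)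
        · have : PySem.List.pyRange (a + 1) b 1 = [] := by
            apply List.eq_nil_iff_forall_not_mem.mpr
            intro x hx
            have := PySem.List.mem_pyRange_one.mp hx
            omega
          simp [this]
  · have : PySem.List.pyRange a b 1 = [] := by
      apply List.eq_nil_iff_forall_not_mem.mpr
      intro x hx
      have := PySem.List.mem_pyRange_one.mp hx
      omega
    simp [this]

-- A's first-hit loop over an ascending list equals the minimum of all hits
theorem pvALoop_eq_min (p r : String) (l : List Int) (hs : l.Pairwise (· ≤ ·)) :
    pvALoop p r l
      = match PySem.List.min?
          (l.filter (fun s => PySem.Str.isIn (PySem.Str.slice p (some s) (some (s + 50))) r))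
          (fun x => x) with
        | none => (false, "")
        | some b => (true, PySem.Str.slice p (some b) (some (b + 50))) := by
  induction l with
  | nil => rfl
  | cons s rest ih =>
    have hle : ∀ y ∈ rest, s ≤ y := (List.pairwise_cons.mp hs).1
    have htail := (List.pairwise_cons.mp hs).2
    simp only [pvALoop]
    by_cases hhit : PySem.Str.isIn (PySem.Str.slice p (some s) (some (s + 50))) r = true
    · rw [if_pos hhit]
      have hfil : (s :: rest).filter
          (fun t => PySem.Str.isIn (PySem.Str.slice p (some t) (some (t + 50))) r)
          = s :: rest.filter (fun t => PySem.Str.isIn (PySem.Str.slice p (some t) (some (t + 50))) r) := by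
        simp only [List.filter_cons, hhit, if_true]
      rw [hfil, PySem.List.min?_id_cons, pv_foldl_min_self]
      intro y hy
      exact hle y (List.mem_of_mem_filter hy)
    · rw [if_neg hhit]
      rw [Bool.not_eq_true] at hhit
      have hfil : (s :: rest).filter
          (fun t => PySem.Str.isIn (PySem.Str.slice p (some t) (some (t + 50))) r)
          = rest.filter (fun t => PySem.Str.isIn (PySem.Str.slice p (some t) (some (t + 50))) r) := by
        simp only [List.filter_cons, hhit, Bool.false_eq_true, if_false]
      rw [hfil]
      exact ih htail

-- general: equal minima of two candidate lists that dominate each other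
theorem pv_min?_eq (A B : List Int)
    (h1 : ∀ b ∈ B, b ∈ A) (h2 : ∀ a ∈ A, ∃ b ∈ B, b ≤ a) :
    PySem.List.min? A (fun x => x) = PySem.List.min? B (fun x => x) := by
  cases hB : PySem.List.min? B (fun x => x) with
  | none =>
    have hBnil := (PySem.List.min?_eq_none_iff B (fun x => x)).mp hB
    have hAnil : A = [] := by
      apply List.eq_nil_iff_forall_not_mem.mpr
      intro a ha
      obtain ⟨b, hb, _⟩ := h2 a ha
      rw [hBnil] at hb
      exact absurd hb (List.not_mem_nil)
    rw [(PySem.List.min?_eq_none_iff A (fun x => x)).mpr hAnil]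
  | some mB =>
    have hmBA : mB ∈ A := h1 mB (PySem.List.min?_mem hB)
    cases hA : PySem.List.min? A (fun x => x) with
    | none =>
      have := (PySem.List.min?_eq_none_iff A (fun x => x)).mp hA
      rw [this] at hmBA
      exact absurd hmBA (List.not_mem_nil)
    | some mA =>
      have h3 : mA ≤ mB := PySem.List.min?_isMin hA mB hmBA
      obtain ⟨b, hb, hble⟩ := h2 mA (PySem.List.min?_mem hA)
      have h4 : mB ≤ b := PySem.List.min?_isMin hB b hb
      have : mA = mB := le_antisymm h3 (le_trans h4 hble)
      rw [this]

-- every B hit is a valid A start with a matching fragment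
theorem pv_hitB_to_A (p r : String) (b : Int) (hb : b ∈ pvHits p r) :
    b ∈ (PySem.List.pyRange 0 (PySem.Str.len p - 50 + 1) 1).filter
      (fun s => PySem.Str.isIn (PySem.Str.slice p (some s) (some (s + 50))) r) := by
  rw [pvHits, List.mem_filter, List.mem_map] at hb
  obtain ⟨⟨i, hi, hfind⟩, hne⟩ := hb
  rw [PySem.List.mem_pyRange_one, PySem.Str.len_eq] at hi
  obtain ⟨hi0, hiu⟩ := hi
  have hicast : ((i.toNat : Nat) : Int) = i := Int.toNat_of_nonneg hi0
  -- the response window at i, as a char list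
  have hw : (PySem.Str.slice r (some i) (some (i + 50))).toList
      = (r.toList.drop i.toNat).take 50 := by
    rw [← hicast, pv_slice_toList]
    simp only [Int.toNat_natCast]
  have hwlen : (PySem.Str.slice r (some i) (some (i + 50))).toList.length = 50 := by
    rw [hw, List.length_take, List.length_drop]; omega
  have hbne : b ≠ -1 := by simpa using hne
  have hb0 : 0 ≤ b := by
    have := PySem.Chars.neg_one_le_find p.toList (PySem.Str.slice r (some i) (some (i + 50))).toList
    rw [← PySem.Str.find_eq, hfind] at this
    omega
  have hfind' : PySem.Chars.find p.toList (PySem.Str.slice r (some i) (some (i + 50))).toList = b := by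
    rw [← PySem.Str.find_eq, hfind]
  have hspec := PySem.Chars.find_spec (s := p.toList)
    (sub := (PySem.Str.slice r (some i) (some (i + 50))).toList) (by rw [hfind']; exact hb0)
  rw [hfind'] at hspec
  obtain ⟨hpre, _⟩ := hspec
  have hroom : b.toNat + 50 ≤ p.toList.length := by
    have := hpre.length_le
    rw [hwlen, List.length_drop] at this
    omega
  have hbcast : ((b.toNat : Nat) : Int) = b := Int.toNat_of_nonneg hb0
  rw [List.mem_filter]
  constructor
  · rw [PySem.List.mem_pyRange_one, PySem.Str.len_eq]
    omega
  · -- fragment at b in p equals the response window, an infix of r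
    have hfrag : (PySem.Str.slice p (some b) (some (b + 50))).toList
        = (PySem.Str.slice r (some i) (some (i + 50))).toList := by
      rw [← hbcast, pv_slice_toList]
      have := List.prefix_iff_eq_take.mp hpre
      rw [hwlen] at this
      exact this.symm
    rw [PySem.Str.isIn_iff_infix, hfrag, hw]
    exact ⟨r.toList.take i.toNat, (r.toList.drop i.toNat).drop 50, by
      rw [List.append_assoc, List.take_append_drop, List.take_append_drop]⟩

-- every A hit is dominated by some B hit
theorem pv_hitA_to_B (p r : String) (a : Int)
    (ha : a ∈ (PySem.List.pyRange 0 (PySem.Str.len p - 50 + 1) 1).filter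
      (fun s => PySem.Str.isIn (PySem.Str.slice p (some s) (some (s + 50))) r)) :
    ∃ b ∈ pvHits p r, b ≤ a := by
  rw [List.mem_filter, PySem.List.mem_pyRange_one, PySem.Str.len_eq] at ha
  obtain ⟨⟨ha0, hau⟩, hhit⟩ := ha
  have hacast : ((a.toNat : Nat) : Int) = a := Int.toNat_of_nonneg ha0
  have hfrag : (PySem.Str.slice p (some a) (some (a + 50))).toList
      = (p.toList.drop a.toNat).take 50 := by
    rw [← hacast, pv_slice_toList]
    simp only [Int.toNat_natCast]
  have hflen : (PySem.Str.slice p (some a) (some (a + 50))).toList.length = 50 := by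
    rw [hfrag, List.length_take, List.length_drop]; omega
  rw [PySem.Str.isIn_iff_infix] at hhit
  obtain ⟨pre, post, hdecomp⟩ := hhit
  -- the response window at i := pre.length equals the fragment
  set i : Nat := pre.length with hi
  have hdrop : r.toList.drop i = (PySem.Str.slice p (some a) (some (a + 50))).toList ++ post := by
    rw [← hdecomp, hi, List.append_assoc, List.drop_left]
  have hroom : i + 50 ≤ r.toList.length := by
    have : r.toList.length = pre.length + ((PySem.Str.slice p (some a) (some (a + 50))).toList.length + post.length) := by
      rw [← hdecomp]; simp
    omega
  have hwin : (PySem.Str.slice r (some (i : Int)) (some ((i : Int) + 50))).toList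
      = (PySem.Str.slice p (some a) (some (a + 50))).toList := by
    rw [pv_slice_toList, hdrop, ← hflen, List.take_left]
  -- the fragment is a prefix of p dropped at a, hence findable in p
  have hpref : (PySem.Str.slice p (some a) (some (a + 50))).toList <+: p.toList.drop a.toNat := by
    rw [hfrag]; exact List.take_prefix _ _
  have hinfix : (PySem.Str.slice p (some a) (some (a + 50))).toList <:+: p.toList := by
    exact List.IsInfix.trans hpref.isInfix (List.drop_suffix _ _).isInfix
  set w := PySem.Str.slice r (some (i : Int)) (some ((i : Int) + 50)) with hwdef
  have hfne : PySem.Chars.find p.toList w.toList ≠ -1 := by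
    rw [(PySem.Chars.find_ne_neg_one_iff p.toList w.toList), hwin]
    exact hinfix
  set b := PySem.Str.find p w with hbdef
  have hbfind : PySem.Chars.find p.toList w.toList = b := by rw [hbdef, PySem.Str.find_eq]
  have hb0 : 0 ≤ b := by
    have := PySem.Chars.neg_one_le_find p.toList w.toList
    rw [hbfind] at this
    rw [hbfind] at hfne
    omega
  refine ⟨b, ?_, ?_⟩
  · rw [pvHits, List.mem_filter]
    constructor
    · rw [List.mem_map]
      refine ⟨(i : Int), ?_, rfl⟩
      rw [PySem.List.mem_pyRange_one, PySem.Str.len_eq]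
      constructor
      · positivity
      · omega
    · rw [hbfind] at hfne
      simpa using hfne
  · -- first occurrence ≤ a, else find_spec's minimality is violated at a
    by_contra hgt
    rw [not_le] at hgt
    have hspec := PySem.Chars.find_spec (s := p.toList) (sub := w.toList) (by rw [hbfind]; exact hb0)
    rw [hbfind] at hspec
    have := hspec.2 a.toNat (by omega)
    rw [hwin] at this
    exact this hpref

theorem pv_main (p r : String) : check_verbatim_py p r = check_verbatim_py_alt p r := by
  rw [check_verbatim_py, check_verbatim_py_alt]
  split_ifs with hlt
  · rfl
  · rw [pvALoop_eq_min p r _ (pv_pyRange_pairwise _ _)]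
    rw [pv_min?_eq _ (pvHits p r) (pv_hitB_to_A p r) (pv_hitA_to_B p r)]

-- ===== VERDICT (by name: the statement is the Claim_ definition above) =====
theorem check_verbatim_py_spec : Claim_equal_check_verbatim_py := by
  intro p r _
  unfold Spec_check_verbatim_py
  exact pv_main p r
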